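-- pv_equiv track=rewrite | github.com/spinxog/DSLSF | scripts/advanced/clustering_ranking_calibration.py | _predict_secondary_structure_simple
-- ===== SOURCE A (Python) =====
-- def _predict_secondary_structure_simple(sequence: str) -> str:
--     """Simple but real secondary structure prediction."""
--     n = len(sequence)
--     ss = ['.'] * n
--
--     # Simple base pairing based on complementarity
--     for i in range(n):
--         for j in range(i + 4, n):  # Skip local
--             base_i = sequence[i]
--             base_j = sequence[j]
--
--             # Check complementarity
--             if (base_i == 'A' and base_j == 'U') or \
--                (base_i == 'U' and base_j == 'A') or \
--                (base_i == 'G' and base_j == 'C') or \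
--                (base_i == 'C' and base_j == 'G'):
--
--                 # Simple greedy pairing
--                 if ss[i] == '.' and ss[j] == '.':
--                     ss[i] = '('
--                     ss[j] = ')'
--                     break
--
--     return ''.join(ss)
-- ===== SOURCE B (Python) =====
-- def _predict_secondary_structure_simple(sequence: str) -> str:
--     """Greedy first-partner pairing via per-base position lists and monotone pointers (O(n))."""
--     comp = {'A': 'U', 'U': 'A', 'G': 'C', 'C': 'G'}
--     n = len(sequence)
--     pos = {b: [i for i, ch in enumerate(sequence) if ch == b] for b in 'AUGC'}
--     ptr = {b: 0 for b in 'AUGC'}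
--     ss = ['.'] * n
--     paired = [False] * n
--     for i in range(n):
--         if paired[i]:
--             continue
--         c = comp.get(sequence[i])
--         if c is None:
--             continue
--         lst = pos[c]
--         p = ptr[c]
--         while p < len(lst) and (lst[p] < i + 4 or paired[lst[p]]):
--             p += 1
--         if p < len(lst):
--             j = lst[p]
--             ss[i] = '('
--             ss[j] = ')'
--             paired[i] = True
--             paired[j] = True
--             ptr[c] = p + 1
--         else:
--             ptr[c] = p
--     return ''.join(ss)
-- ===== Notes on version B (the rewrite author's own statement) =====
-- stated objective: faster
-- what changed: Replaces A's per-i rescan of all j>=i+4 (checking pairedness each time) by precomputed per-base position lists with monotonically advancing pointers and a paired[] array, so each candidate position is inspected O(1) times overall.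
import Mathlib
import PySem

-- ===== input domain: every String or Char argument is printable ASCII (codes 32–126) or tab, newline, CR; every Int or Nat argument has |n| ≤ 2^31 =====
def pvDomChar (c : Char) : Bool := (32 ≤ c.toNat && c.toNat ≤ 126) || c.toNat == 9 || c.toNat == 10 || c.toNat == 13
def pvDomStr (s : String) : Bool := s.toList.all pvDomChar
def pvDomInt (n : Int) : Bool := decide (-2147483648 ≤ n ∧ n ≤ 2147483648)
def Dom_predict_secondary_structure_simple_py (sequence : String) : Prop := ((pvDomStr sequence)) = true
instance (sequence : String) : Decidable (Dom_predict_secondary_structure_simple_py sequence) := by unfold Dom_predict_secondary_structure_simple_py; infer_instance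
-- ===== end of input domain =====

-- B replaces A's quadratic rescans of j ≥ i+4 by per-base position lists with monotone pointers; equal return value proved.

-- ===== PORT A =====
-- complementarity test, A's four-clause boolean expression
def pvComp (a b : Char) : Bool :=
  (a == 'A' && b == 'U') || (a == 'U' && b == 'A') || (a == 'G' && b == 'C') || (a == 'C' && b == 'G')

-- inner 'for j in range(i+4, n)' with its break
def pvAInner (seq : List Char) (i : Nat) (ss : List Char) : List Nat → List Char
  | [] => ss
  | j :: js =>
    if pvComp (seq.getD i ' ') (seq.getD j ' ') then
      if ss.getD i ' ' == '.' && ss.getD j ' ' == '.' then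
        (ss.set i '(').set j ')'
      else pvAInner seq i ss js
    else pvAInner seq i ss js

-- outer 'for i in range(n)'
def pvALoop (seq : List Char) : List Char → List Nat → List Char
  | ss, [] => ss
  | ss, i :: is => pvALoop seq (pvAInner seq i ss (List.range' (i + 4) (seq.length - (i + 4)))) is

def predict_secondary_structure_simple_py (sequence : String) : String :=
  String.ofList (pvALoop sequence.toList
    (List.replicate sequence.toList.length '.') (List.range sequence.toList.length))

-- ===== PORT B =====
-- comp.get(base)
def pvCompOf (a : Char) : Option Char :=
  if a == 'A' then some 'U' else if a == 'U' then some 'A'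
  else if a == 'G' then some 'C' else if a == 'C' then some 'G' else none

-- pos[b] = [i for i, ch in enumerate(sequence) if ch == b]
def pvPositions (seq : List Char) (c : Char) : List Nat :=
  (List.range seq.length).filter (fun k => seq.getD k ' ' == c)

-- the 'while p < len(lst) and (lst[p] < i+4 or paired[lst[p]])' pointer advance
def pvAdvance (lst : List Nat) (thr : Nat) (paired : List Bool) (p : Nat) : Nat :=
  if h : p < lst.length then
    if lst.getD p 0 < thr || paired.getD (lst.getD p 0) false then
      pvAdvance lst thr paired (p + 1)
    else p
  else p
termination_by lst.length - p

-- one iteration of B's 'for i in range(n)'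
def pvBStep (seq : List Char) (st : List Char × List Bool × PySem.Dict Char Nat) (i : Nat) :
    List Char × List Bool × PySem.Dict Char Nat :=
  if st.2.1.getD i false then st
  else
    match pvCompOf (seq.getD i ' ') with
    | none => st
    | some c =>
      let lst := pvPositions seq c
      let p := pvAdvance lst (i + 4) st.2.1 (st.2.2.getD c 0)
      if p < lst.length then
        let j := lst.getD p 0
        ((st.1.set i '(').set j ')', (st.2.1.set i true).set j true, st.2.2.insert c (p + 1))
      else (st.1, st.2.1, st.2.2.insert c p)

-- ptr = {b: 0 for b in 'AUGC'}
def pvBInitPtr : PySem.Dict Char Nat :=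
  (((PySem.Dict.empty.insert 'A' 0).insert 'U' 0).insert 'G' 0).insert 'C' 0

def predict_secondary_structure_simple_py_alt (sequence : String) : String :=
  String.ofList ((List.range sequence.toList.length).foldl (pvBStep sequence.toList)
    (List.replicate sequence.toList.length '.', List.replicate sequence.toList.length false, pvBInitPtr)).1

-- ===== PRECONDITION & SPEC =====
def Spec_predict_secondary_structure_simple_py (sequence : String) (out : String) : Prop := out = predict_secondary_structure_simple_py_alt sequence
instance (sequence : String) (out : String) : Decidable (Spec_predict_secondary_structure_simple_py sequence out) := by unfold Spec_predict_secondary_structure_simple_py; infer_instance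

-- ===== CLAIM (what is proved, stated in full; the proofs are below) =====
def Claim_equal_predict_secondary_structure_simple_py : Prop := ∀ (sequence : String), Dom_predict_secondary_structure_simple_py sequence → Spec_predict_secondary_structure_simple_py sequence (predict_secondary_structure_simple_py sequence)

-- ===== LEMMAS AND PROOFS =====

-- getD after set, in closed form
lemma pvGetD_set {α : Type} (l : List α) (i k : Nat) (a d : α) :
    (l.set i a).getD k d = if i = k ∧ i < l.length then a else l.getD k d := by
  simp [List.getD, List.getElem?_set]
  split_ifs <;> simp_all <;> omega

-- what the while loop computes: first position from p that is ≥ thr and unpaired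
lemma pvAdvance_spec (lst : List Nat) (thr : Nat) (paired : List Bool) (p : Nat) :
    p ≤ pvAdvance lst thr paired p ∧ pvAdvance lst thr paired p ≤ max p lst.length ∧
    (∀ r, p ≤ r → r < pvAdvance lst thr paired p →
      lst.getD r 0 < thr ∨ paired.getD (lst.getD r 0) false = true) ∧
    (pvAdvance lst thr paired p < lst.length →
      ¬ lst.getD (pvAdvance lst thr paired p) 0 < thr ∧
      paired.getD (lst.getD (pvAdvance lst thr paired p) 0) false = false) := by
  induction p using pvAdvance.induct lst thr paired with
  | case1 p h hc ih =>
    rw [pvAdvance, dif_pos h, if_pos hc]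
    refine ⟨by omega, by omega, ?_, ih.2.2.2⟩
    intro r hr hr2
    rcases Nat.eq_or_lt_of_le hr with he | hl
    · subst he; simpa using hc
    · exact ih.2.2.1 r hl hr2
  | case2 p h hc =>
    rw [pvAdvance, dif_pos h, if_neg hc]
    refine ⟨le_refl _, by omega, fun r h1 h2 => by omega, fun _ => by simpa using hc⟩
  | case3 p h =>
    rw [pvAdvance, dif_neg h]
    exact ⟨le_refl _, by omega, fun r h1 h2 => by omega, fun hlt => absurd hlt h⟩

-- find? = some l[q] when everything before index q fails and l[q] succeeds
lemma pvFind?_eq_some_idx {α : Type} (d : α) (g : α → Bool) :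
    ∀ (l : List α) (q : Nat), q < l.length → (∀ r, r < q → g (l.getD r d) = false) →
    g (l.getD q d) = true → l.find? g = some (l.getD q d) := by
  intro l
  induction l with
  | nil => intro q hq; simp at hq
  | cons a t ih =>
    intro q hq hfail hq2
    cases q with
    | zero => simp_all
    | succ q' =>
      have h0 : g a = false := by simpa using hfail 0 (by omega)
      simp only [List.find?_cons, h0]
      simp only [List.getD, List.getElem?_cons_succ] at hq2 ⊢
      exact ih q' (by simpa using hq) (fun r hr => by simpa using hfail (r+1) (by omega)) hq2

lemma pvFind?_eq_none_idx {α : Type} (d : α) (g : α → Bool) (l : List α)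
    (hfail : ∀ r, r < l.length → g (l.getD r d) = false) : l.find? g = none := by
  rw [List.find?_eq_none]
  intro x hx
  obtain ⟨r, hr, he⟩ := List.mem_iff_getElem.mp hx
  have := hfail r hr
  rw [List.getD_eq_getElem _ _ hr, he] at this
  simp [this]

-- find? is determined by the predicate's values on the list's members
lemma pvFind?_congr {α : Type} (p q : α → Bool) (l : List α) (h : ∀ x ∈ l, p x = q x) :
    l.find? p = l.find? q := by
  induction l with
  | nil => rfl
  | cons a t ih =>
    simp only [List.find?_cons]
    rw [h a (by simp)]
    cases q a
    · exact ih (fun x hx => h x (by simp [hx]))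
    · rfl

lemma pvComp_none {a : Char} (h : pvCompOf a = none) (b : Char) : pvComp a b = false := by
  unfold pvCompOf at h
  unfold pvComp
  split_ifs at h <;> simp_all

lemma pvComp_some {a c : Char} (h : pvCompOf a = some c) (b : Char) : pvComp a b = (b == c) := by
  unfold pvCompOf at h
  unfold pvComp
  split_ifs at h
  all_goals simp_all
  all_goals (subst h; tauto)

-- every entry of pos[c] is an in-range position holding base c
lemma pvPositions_elem (seq : List Char) (c : Char) (r : Nat)
    (hr : r < (pvPositions seq c).length) :
    (pvPositions seq c).getD r 0 < seq.length ∧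
    seq.getD ((pvPositions seq c).getD r 0) ' ' = c := by
  have hm : (pvPositions seq c).getD r 0 ∈ pvPositions seq c := by
    rw [List.getD_eq_getElem _ _ hr]; exact List.getElem_mem hr
  unfold pvPositions at hm
  rw [List.mem_filter, List.mem_range] at hm
  exact ⟨hm.1, by simpa using hm.2⟩

-- A's inner loop when position i is already taken: no change
lemma pvAInner_skip (seq : List Char) (i : Nat) (ss : List Char) (h : ¬ ss.getD i ' ' = '.') :
    ∀ js, pvAInner seq i ss js = ss := by
  intro js
  induction js with
  | nil => rfl
  | cons j t ih =>
    unfold pvAInner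
    by_cases h1 : pvComp (seq.getD i ' ') (seq.getD j ' ') = true
    · rw [if_pos h1, if_neg (by rw [Bool.and_eq_true, beq_iff_eq, beq_iff_eq]; exact fun hc => h hc.1)]
      exact ih
    · rw [if_neg h1]
      exact ih

-- A's inner loop = pair with the first complementary unpaired j, if any
lemma pvAInner_find (seq : List Char) (i : Nat) (ss : List Char) (h : ss.getD i ' ' = '.') :
    ∀ js, pvAInner seq i ss js =
      match js.find? (fun j => pvComp (seq.getD i ' ') (seq.getD j ' ') && (ss.getD j ' ' == '.')) with
      | none => ss
      | some j => (ss.set i '(').set j ')' := by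
  intro js
  induction js with
  | nil => rfl
  | cons j t ih =>
    by_cases h1 : pvComp (seq.getD i ' ') (seq.getD j ' ') = true
    · by_cases h2 : ss.getD j ' ' = '.'
      · rw [List.find?_cons_of_pos (by rw [Bool.and_eq_true, beq_iff_eq]; exact ⟨h1, h2⟩)]
        unfold pvAInner
        rw [if_pos h1, if_pos (by rw [Bool.and_eq_true, beq_iff_eq, beq_iff_eq]; exact ⟨h, h2⟩)]
      · rw [List.find?_cons_of_neg (by rw [Bool.and_eq_true, beq_iff_eq]; exact fun hc => h2 hc.2)]
        unfold pvAInner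
        rw [if_pos h1, if_neg (by rw [Bool.and_eq_true, beq_iff_eq, beq_iff_eq]; exact fun hc => h2 hc.2)]
        exact ih
    · rw [List.find?_cons_of_neg (by rw [Bool.and_eq_true]; exact fun hc => h1 hc.1)]
      unfold pvAInner
      rw [if_neg h1]
      exact ih

-- the relation between A's state (ss) and B's state (ss, paired, ptr) before iteration i
def pvInv (seq ss : List Char) (paired : List Bool) (ptr : PySem.Dict Char Nat) (i : Nat) : Prop :=
  ss.length = seq.length ∧ paired.length = seq.length ∧
  (∀ k, k < seq.length → (paired.getD k false = true ↔ ¬ ss.getD k ' ' = '.')) ∧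
  (∀ c : Char, ptr.getD c 0 ≤ (pvPositions seq c).length ∧
    ∀ q, q < ptr.getD c 0 →
      (pvPositions seq c).getD q 0 < i + 4 ∨
        paired.getD ((pvPositions seq c).getD q 0) false = true)

lemma pvInv_mono (seq ss : List Char) (paired : List Bool) (ptr : PySem.Dict Char Nat) (i : Nat)
    (h : pvInv seq ss paired ptr i) : pvInv seq ss paired ptr (i + 1) := by
  obtain ⟨h1, h2, h3, h4⟩ := h
  refine ⟨h1, h2, h3, fun c => ⟨(h4 c).1, fun q hq => ?_⟩⟩
  rcases (h4 c).2 q hq with hl | hr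
  · exact Or.inl (by omega)
  · exact Or.inr hr

lemma pvInv_init (seq : List Char) :
    pvInv seq (List.replicate seq.length '.') (List.replicate seq.length false) pvBInitPtr 0 := by
  have h0 : ∀ c : Char, pvBInitPtr.getD c 0 = 0 := by
    intro c
    simp only [pvBInitPtr, PySem.Dict.getD_insert, PySem.Dict.getD_empty]
    split_ifs <;> rfl
  refine ⟨by simp, by simp, fun k hk => ?_, fun c => ⟨by rw [h0]; omega, fun q hq => by rw [h0] at hq; omega⟩⟩
  rw [List.getD_eq_getElem _ _ (by simpa using hk), List.getD_eq_getElem _ _ (by simpa using hk)]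
  simp

lemma pvStep_eq (seq ss : List Char) (paired : List Bool) (ptr : PySem.Dict Char Nat) (i : Nat)
    (hi : i < seq.length) (hInv : pvInv seq ss paired ptr i) :
    pvAInner seq i ss (List.range' (i + 4) (seq.length - (i + 4)))
      = (pvBStep seq (ss, paired, ptr) i).1
    ∧ pvInv seq (pvBStep seq (ss, paired, ptr) i).1 (pvBStep seq (ss, paired, ptr) i).2.1
        (pvBStep seq (ss, paired, ptr) i).2.2 (i + 1) := by
  obtain ⟨hss, hpd, hp, hptr⟩ := hInv
  have hb : ∀ j, j < seq.length → (!paired.getD j false) = (ss.getD j ' ' == '.') := by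
    intro j hj
    cases hpj : paired.getD j false
    · have hx : ss.getD j ' ' = '.' := by
        by_contra hC
        have := (hp j hj).mpr hC
        rw [hpj] at this
        exact Bool.false_ne_true this
      rw [hx]; simp
    · have hx : ¬ ss.getD j ' ' = '.' := (hp j hj).mp hpj
      rw [Bool.not_true]
      exact (beq_eq_false_iff_ne.mpr hx).symm
  by_cases hpi : paired.getD i false = true
  · -- position i already paired: both sides leave everything unchanged
    have hssi : ¬ ss.getD i ' ' = '.' := (hp i hi).mp hpi
    have hB : pvBStep seq (ss, paired, ptr) i = (ss, paired, ptr) := by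
      unfold pvBStep; rw [if_pos hpi]
    rw [hB]
    exact ⟨pvAInner_skip seq i ss hssi _, pvInv_mono _ _ _ _ _ ⟨hss, hpd, hp, hptr⟩⟩
  · rw [Bool.not_eq_true] at hpi
    have hni : ¬ paired.getD i false = true := by rw [hpi]; exact Bool.false_ne_true
    have hssi : ss.getD i ' ' = '.' := by
      by_contra hC
      exact hni ((hp i hi).mpr hC)
    have hA := pvAInner_find seq i ss hssi (List.range' (i + 4) (seq.length - (i + 4)))
    cases hco : pvCompOf (seq.getD i ' ') with
    | none =>
      have hni : ¬ paired.getD i false = true := by rw [hpi]; exact Bool.false_ne_true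
      have hB : pvBStep seq (ss, paired, ptr) i = (ss, paired, ptr) := by
        unfold pvBStep; rw [if_neg hni, hco]
      rw [hB]
      refine ⟨?_, pvInv_mono _ _ _ _ _ ⟨hss, hpd, hp, hptr⟩⟩
      rw [List.find?_eq_none.mpr (fun x _ => by
        rw [Bool.and_eq_true, pvComp_none hco]
        exact fun hc => Bool.false_ne_true hc.1)] at hA
      exact hA
    | some c =>
      have hlen := (hptr c).1
      have hadv := pvAdvance_spec (pvPositions seq c) (i + 4) paired (ptr.getD c 0)
      set lst := pvPositions seq c with hlst
      set q := pvAdvance lst (i + 4) paired (ptr.getD c 0) with hq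
      have hqlen : q ≤ lst.length := by omega
      -- every entry before q is below the window or already paired
      have hfailD : ∀ r, r < q → lst.getD r 0 < i + 4 ∨ paired.getD (lst.getD r 0) false = true := by
        intro r hr
        by_cases hr0 : r < ptr.getD c 0
        · exact (hptr c).2 r hr0
        · exact hadv.2.2.1 r (by omega) hr
      have hfail : ∀ r, r < q → (decide (i + 4 ≤ lst.getD r 0) && !paired.getD (lst.getD r 0) false) = false := by
        intro r hr
        rcases hfailD r hr with hl | hr2
        · rw [decide_eq_false (by omega : ¬ i + 4 ≤ lst.getD r 0)]
          rfl
        · rw [hr2]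
          simp
      -- A's scan over [i+4, n) equals the scan of pos[c] from the pointer
      have hH : ∀ x : Nat, (decide ((seq.getD x ' ' == c) = true ∧ (decide (i + 4 ≤ x) && !paired.getD x false) = true))
          = ((seq.getD x ' ' == c) && (decide (i + 4 ≤ x) && !paired.getD x false)) := by
        intro x
        cases seq.getD x ' ' == c <;> cases (decide (i + 4 ≤ x) && !paired.getD x false) <;> simp
      have hchain : (List.range' (i + 4) (seq.length - (i + 4))).find?
            (fun j => pvComp (seq.getD i ' ') (seq.getD j ' ') && (ss.getD j ' ' == '.'))
          = lst.find? (fun j => decide (i + 4 ≤ j) && !paired.getD j false) := by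
        rw [hlst]
        unfold pvPositions
        rw [List.find?_filter]
        rw [pvFind?_congr _ (fun x => (seq.getD x ' ' == c) && (decide (i + 4 ≤ x) && !paired.getD x false))
          _ (fun x _ => hH x)]
        by_cases hn : seq.length ≤ i + 4
        · have he : seq.length - (i + 4) = 0 := by omega
          rw [he]
          rw [pvFind?_eq_none_idx 0 _ (List.range seq.length) (fun r hr => by
            have hrn : r < seq.length := by simpa using hr
            rw [List.getD_eq_getElem _ _ hr, List.getElem_range]
            rw [decide_eq_false (by omega : ¬ i + 4 ≤ r)]
            cases seq.getD r ' ' == c <;> rfl)]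
          rfl
        · rw [not_le] at hn
          have hsplit : List.range seq.length
              = List.range' 0 (i + 4) ++ List.range' (i + 4) (seq.length - (i + 4)) := by
            rw [List.range_eq_range']
            rw [show seq.length = (i + 4) + (seq.length - (i + 4)) by omega]
            rw [← List.range'_append_1]
            simp
          rw [hsplit, List.find?_append]
          rw [pvFind?_eq_none_idx 0 _ (List.range' 0 (i + 4)) (fun r hr => by
            have hrl : r < i + 4 := by simpa using hr
            rw [List.getD_eq_getElem _ _ hr, List.getElem_range']
            rw [decide_eq_false (by omega : ¬ i + 4 ≤ 0 + 1 * r)]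
            cases seq.getD (0 + 1 * r) ' ' == c <;> rfl)]
          simp only [Option.none_or]
          apply pvFind?_congr
          intro x hx
          rw [List.mem_range'_1] at hx
          have hxn : x < seq.length := by omega
          rw [pvComp_some hco, ← hb x hxn, decide_eq_true (by omega : i + 4 ≤ x), Bool.true_and]
      by_cases hql : q < lst.length
      · -- a partner exists: both sides pair i with j = lst[q]
        obtain ⟨hjn, hjc⟩ := pvPositions_elem seq c q hql
        set j := lst.getD q 0 with hj
        obtain ⟨hge, hup⟩ := hadv.2.2.2 hql
        have hij : i + 4 ≤ j := by rw [hj]; omega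
        have hgj : (decide (i + 4 ≤ j) && !paired.getD j false) = true := by
          rw [hup, decide_eq_true hij]
          rfl
        have hfind : lst.find? (fun j => decide (i + 4 ≤ j) && !paired.getD j false) = some j := by
          have := pvFind?_eq_some_idx 0 (fun j => decide (i + 4 ≤ j) && !paired.getD j false) lst q hql
            (fun r hr => hfail r hr) hgj
          simpa using this
        rw [hchain, hfind] at hA
        have hB : pvBStep seq (ss, paired, ptr) i
            = ((ss.set i '(').set j ')', (paired.set i true).set j true, ptr.insert c (q + 1)) := by
          unfold pvBStep
          rw [if_neg hni, hco]
          show (if pvAdvance (pvPositions seq c) (i + 4) paired (ptr.getD c 0) < (pvPositions seq c).length then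
              ((ss.set i '(').set ((pvPositions seq c).getD (pvAdvance (pvPositions seq c) (i + 4) paired (ptr.getD c 0)) 0) ')',
               (paired.set i true).set ((pvPositions seq c).getD (pvAdvance (pvPositions seq c) (i + 4) paired (ptr.getD c 0)) 0) true,
               ptr.insert c (pvAdvance (pvPositions seq c) (i + 4) paired (ptr.getD c 0) + 1))
            else (ss, paired, ptr.insert c (pvAdvance (pvPositions seq c) (i + 4) paired (ptr.getD c 0)))) = _
          rw [← hlst, ← hq, if_pos hql, ← hj]
        rw [hB]
        refine ⟨hA, ?_, ?_, ?_, ?_⟩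
        · simp [hss]
        · simp [hpd]
        · -- pairedness still mirrors the dots
          intro k hk
          rw [pvGetD_set, pvGetD_set, pvGetD_set, pvGetD_set]
          simp only [List.length_set, hss, hpd]
          by_cases hkj : j = k
          · have h1 : j = k ∧ j < seq.length := ⟨hkj, by omega⟩
            rw [if_pos h1, if_pos h1]
            simp
          · have h1 : ¬ (j = k ∧ j < seq.length) := fun hc => hkj hc.1
            rw [if_neg h1, if_neg h1]
            by_cases hki : i = k
            · have h2 : i = k ∧ i < seq.length := ⟨hki, by omega⟩
              rw [if_pos h2, if_pos h2]
              simp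
            · have h2 : ¬ (i = k ∧ i < seq.length) := fun hc => hki hc.1
              rw [if_neg h2, if_neg h2]
              exact hp k hk
        · -- pointer invariant, per letter
          intro c'
          have hmono : ∀ x, paired.getD x false = true →
              ((paired.set i true).set j true).getD x false = true := by
            intro x hx
            rw [pvGetD_set, pvGetD_set]
            split_ifs <;> simp_all
          rw [PySem.Dict.getD_insert]
          by_cases hcc : c' = c
          · rw [if_pos hcc, hcc, ← hlst]
            refine ⟨by omega, fun r hr => ?_⟩
            by_cases hrq : r < q
            · rcases hfailD r hrq with hl | hr2
              · exact Or.inl (by omega)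
              · exact Or.inr (hmono _ hr2)
            · have : r = q := by omega
              subst this
              refine Or.inr ?_
              rw [← hj, pvGetD_set]
              have hjj : j = j ∧ j < (paired.set i true).length := ⟨rfl, by simp [hpd, hjn]⟩
              rw [if_pos hjj]
          · rw [if_neg hcc]
            refine ⟨(hptr c').1, fun r hr => ?_⟩
            rcases (hptr c').2 r hr with hl | hr2
            · exact Or.inl (by omega)
            · exact Or.inr (hmono _ hr2)
      · -- no partner: A's scan fails, B only advances the pointer
        have hfind : lst.find? (fun j => decide (i + 4 ≤ j) && !paired.getD j false) = none := by
          have := pvFind?_eq_none_idx 0 (fun j => decide (i + 4 ≤ j) && !paired.getD j false) lst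
            (fun r hr => hfail r (by omega))
          simpa using this
        rw [hchain, hfind] at hA
        have hB : pvBStep seq (ss, paired, ptr) i = (ss, paired, ptr.insert c q) := by
          unfold pvBStep
          rw [if_neg hni, hco]
          show (if pvAdvance (pvPositions seq c) (i + 4) paired (ptr.getD c 0) < (pvPositions seq c).length then
              ((ss.set i '(').set ((pvPositions seq c).getD (pvAdvance (pvPositions seq c) (i + 4) paired (ptr.getD c 0)) 0) ')',
               (paired.set i true).set ((pvPositions seq c).getD (pvAdvance (pvPositions seq c) (i + 4) paired (ptr.getD c 0)) 0) true,
               ptr.insert c (pvAdvance (pvPositions seq c) (i + 4) paired (ptr.getD c 0) + 1))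
            else (ss, paired, ptr.insert c (pvAdvance (pvPositions seq c) (i + 4) paired (ptr.getD c 0)))) = _
          rw [← hlst, ← hq, if_neg hql]
        rw [hB]
        refine ⟨hA, hss, hpd, hp, fun c' => ?_⟩
        rw [PySem.Dict.getD_insert]
        by_cases hcc : c' = c
        · rw [if_pos hcc, hcc, ← hlst]
          refine ⟨by omega, fun r hr => ?_⟩
          rcases hfailD r hr with hl | hr2
          · exact Or.inl (by omega)
          · exact Or.inr hr2
        · rw [if_neg hcc]
          refine ⟨(hptr c').1, fun r hr => ?_⟩
          rcases (hptr c').2 r hr with hl | hr2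
          · exact Or.inl (by omega)
          · exact Or.inr hr2

lemma pvMain (seq : List Char) : ∀ (m t : Nat), t + m = seq.length →
    ∀ ss paired ptr, pvInv seq ss paired ptr t →
    pvALoop seq ss (List.range' t m)
      = ((List.range' t m).foldl (pvBStep seq) (ss, paired, ptr)).1 := by
  intro m
  induction m with
  | zero => intro t ht ss paired ptr hInv; rfl
  | succ m ih =>
    intro t ht ss paired ptr hInv
    rw [List.range'_succ]
    obtain ⟨hEq, hInv'⟩ := pvStep_eq seq ss paired ptr t (by omega) hInv
    show pvALoop seq (pvAInner seq t ss _) (List.range' (t+1) m) = _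
    rw [hEq]
    simp only [List.foldl_cons]
    exact ih (t + 1) (by omega) _ _ _ hInv'

-- ===== VERDICT (by name: the statement is the Claim_ definition above) =====
theorem predict_secondary_structure_simple_py_spec : Claim_equal_predict_secondary_structure_simple_py := by
  intro s _
  unfold Spec_predict_secondary_structure_simple_py
  unfold predict_secondary_structure_simple_py predict_secondary_structure_simple_py_alt
  have h := pvMain s.toList s.toList.length 0 (by omega)
    (List.replicate s.toList.length '.') (List.replicate s.toList.length false) pvBInitPtr
    (pvInv_init s.toList)
  simp only [List.range_eq_range']
  rw [h]
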